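-- pv_equiv track=rewrite | github.com/cap1n3m0/Connect4 | gui.py | getXPosBounds
-- ===== SOURCE A (Python) =====
-- def getXPosBounds(cords):
--     xRanges = {}
--     temp = []
--
--     for pos in cords[0]:
--         x = pos[0]
--         temp.append(x-38)
--
--     i = 0
--     while len(temp) > 0:
--         if i > 0:
--             xRanges[i] = [xRanges[i-1][1], temp[0]]
--             i += 1
--             temp.pop(0)
--         else:
--             xRanges[i] = [temp[0]-38, temp[1]]
--             i += 1
--             temp.pop(0)
--             temp.pop(0)
--
--     xRanges[i] = [xRanges[i-1][1], 745]
--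
--     return xRanges
-- ===== SOURCE B (Python) =====
-- def getXPosBounds(cords):
--     xs = [p[0] - 38 for p in cords[0]]
--     opens = [xs[0] - 38] + xs[1:]
--     closes = xs[1:] + [745]
--     return {k: [o, c] for k, (o, c) in enumerate(zip(opens, closes))}
-- ===== Notes on version B (the rewrite author's own statement) =====
-- stated objective: simpler
-- what changed: Replaces A's while/pop loop with its first-iteration special case and accumulator chaining through xRanges[i-1] by one dict comprehension over enumerate(zip(opens, closes)) of two precomputed boundary lists.
import Mathlib
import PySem

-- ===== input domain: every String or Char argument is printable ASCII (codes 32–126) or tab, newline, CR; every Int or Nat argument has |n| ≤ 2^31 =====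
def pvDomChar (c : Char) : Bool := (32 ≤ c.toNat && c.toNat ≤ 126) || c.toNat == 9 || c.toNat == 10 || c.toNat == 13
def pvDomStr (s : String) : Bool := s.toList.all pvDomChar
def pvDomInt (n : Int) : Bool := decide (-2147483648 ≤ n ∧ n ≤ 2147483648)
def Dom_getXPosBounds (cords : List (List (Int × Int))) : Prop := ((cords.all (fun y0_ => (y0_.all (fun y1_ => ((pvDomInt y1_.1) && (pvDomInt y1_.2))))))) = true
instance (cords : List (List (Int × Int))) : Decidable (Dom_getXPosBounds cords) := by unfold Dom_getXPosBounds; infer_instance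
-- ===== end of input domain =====

-- B replaces A's while/pop loop (first-iteration special case, chaining through
-- xRanges[i-1]) by a single comprehension over enumerate(zip(opens, closes)); simpler.

-- ===== PORT A =====
-- the while-loop: state is (temp, xRanges, i); branches in A's order
def pvLoopA (temp : List Int) (d : PySem.Dict Int (List Int)) (i : Int) :
    PySem.Dict Int (List Int) × Int :=
  match temp with
  | [] => (d, i)
  | t :: rest =>
    if i > 0 then
      pvLoopA rest (d.insert i [(d.getD (i-1) []).getD 1 0, t]) (i+1)
    else
      -- temp[1] = rest.headD 0 (present under Pre_); two pops drop t and rest's head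
      pvLoopA (rest.drop 1) (d.insert i [t - 38, rest.headD 0]) (i+1)
termination_by temp.length
decreasing_by
  all_goals simp

def getXPosBounds (cords : List (List (Int × Int))) : List (Int × List Int) :=
  let temp := (cords.headD []).map (fun pos => pos.1 - 38)
  let r := pvLoopA temp PySem.Dict.empty 0
  (r.1.insert r.2 [(r.1.getD (r.2 - 1) []).getD 1 0, 745]).items

-- ===== PORT B =====
def getXPosBounds_alt (cords : List (List (Int × Int))) : List (Int × List Int) :=
  let xs := (cords.headD []).map (fun p => p.1 - 38)
  let opens := (xs.headD 0 - 38) :: xs.drop 1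
  let closes := xs.drop 1 ++ [745]
  ((opens.zip closes).zipIdx).map (fun p => ((p.2 : Int), [p.1.1, p.1.2]))

-- ===== PRECONDITION & SPEC =====
-- Pre_ excludes exactly the inputs on which A raises: empty cords (IndexError),
-- and cords[0] of length 0 or 1 (KeyError / IndexError).
def Pre_getXPosBounds (cords : List (List (Int × Int))) : Prop :=
  cords ≠ [] ∧ 2 ≤ (cords.headD []).length
instance (cords : List (List (Int × Int))) : Decidable (Pre_getXPosBounds cords) := by
  unfold Pre_getXPosBounds; infer_instance
def pvWitness_getXPosBounds : (List (List (Int × Int))) := [[(100, 0), (200, 0)]]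

def Spec_getXPosBounds (cords : List (List (Int × Int))) (out : List (Int × List Int)) : Prop := out = getXPosBounds_alt cords
instance (cords : List (List (Int × Int))) (out : List (Int × List Int)) : Decidable (Spec_getXPosBounds cords out) := by unfold Spec_getXPosBounds; infer_instance

-- ===== CLAIM (what is proved, stated in full; the proofs are below) =====
def Claim_equal_getXPosBounds : Prop := ∀ (cords : List (List (Int × Int))), Dom_getXPosBounds cords → Pre_getXPosBounds cords → Spec_getXPosBounds cords (getXPosBounds cords)

-- ===== LEMMAS AND PROOFS =====

-- the common shape both programs produce: successive ranges threaded through the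
-- previous close value
def pvChain : Int → Int → List Int → List (Int × List Int)
  | _, _, [] => []
  | i, v, t :: r => (i, [v, t]) :: pvChain (i+1) t r

lemma pvLoopA_full : ∀ (rest : List Int) (d : PySem.Dict Int (List Int)) (i v : Int),
    1 ≤ i → (∀ k ∈ d.keys, k < i) → (d.getD (i-1) []).getD 1 0 = v →
    (let r := pvLoopA rest d i;
     (r.1.insert r.2 [(r.1.getD (r.2 - 1) []).getD 1 0, 745]).items)
      = d.items ++ pvChain i v (rest ++ [745]) := by
  intro rest
  induction rest with
  | nil =>
    intro d i v hi hk hv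
    have hfresh : d.contains i = false := by
      by_contra h
      have : i ∈ d.keys := (PySem.Dict.contains_iff_mem_keys d i).mp (by
        cases hc : d.contains i
        · exact absurd hc h
        · rfl)
      exact absurd (hk i this) (by omega)
    simp only [pvLoopA]
    rw [PySem.Dict.items_insert_of_not_contains _ _ hfresh, hv]
    simp [pvChain]
  | cons t r ih =>
    intro d i v hi hk hv
    have hfresh : d.contains i = false := by
      by_contra h
      have : i ∈ d.keys := (PySem.Dict.contains_iff_mem_keys d i).mp (by
        cases hc : d.contains i
        · exact absurd hc h
        · rfl)
      exact absurd (hk i this) (by omega)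
    have hpos : i > 0 := by omega
    have hv2 : (d.getD (i-1) [])[1]?.getD 0 = v := hv
    have step : pvLoopA (t :: r) d i = pvLoopA r (d.insert i [v, t]) (i+1) := by
      simp [pvLoopA, hpos, hv2]
    have hk' : ∀ k ∈ (d.insert i [v, t]).keys, k < i + 1 := by
      intro k hkm
      rcases (PySem.Dict.mem_keys_insert _ _ _ _).mp hkm with h | h
      · omega
      · exact lt_trans (hk k h) (by omega)
    have hv' : ((d.insert i [v, t]).getD (i + 1 - 1) []).getD 1 0 = t := by
      have : i + 1 - 1 = i := by omega
      rw [this, PySem.Dict.getD_insert_self]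
      rfl
    have := ih (d.insert i [v, t]) (i+1) t (by omega) hk' hv'
    simp only [step, this, PySem.Dict.items_insert_of_not_contains _ _ hfresh]
    simp [pvChain]

lemma pvZip_chain : ∀ (t : List Int) (v : Int) (i : Nat) (c : Int),
    (((v :: t).zip (t ++ [c])).zipIdx i).map (fun p => ((p.2 : Int), [p.1.1, p.1.2]))
      = pvChain (i : Int) v (t ++ [c]) := by
  intro t
  induction t with
  | nil => intro v i c; simp [pvChain]
  | cons t0 tr ih =>
    intro v i c
    have := ih t0 (i+1) c
    simp only [List.cons_append, List.zip_cons_cons, List.zipIdx_cons, List.map_cons] at *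
    rw [this]
    simp only [pvChain]
    push_cast
    norm_num

-- ===== VERDICT (by name: the statement is the Claim_ definition above) =====
theorem getXPosBounds_spec : Claim_equal_getXPosBounds := by
  intro cords _ hpre
  obtain ⟨hne, hlen⟩ := hpre
  unfold Spec_getXPosBounds
  obtain ⟨c0, cs, rfl⟩ : ∃ c0 cs, cords = c0 :: cs := by
    cases cords with
    | nil => exact absurd rfl hne
    | cons c0 cs => exact ⟨c0, cs, rfl⟩
  simp only [List.headD_cons] at hlen
  obtain ⟨p, q, ps, rfl⟩ : ∃ p q ps, c0 = p :: q :: ps := by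
    cases c0 with
    | nil => simp at hlen
    | cons p c1 =>
      cases c1 with
      | nil => simp at hlen
      | cons q ps => exact ⟨p, q, ps, rfl⟩
  unfold getXPosBounds getXPosBounds_alt
  simp only [List.headD_cons, List.map_cons, List.drop_succ_cons, List.drop_zero]
  have step0 : pvLoopA ((p.1 - 38) :: (q.1 - 38) :: ps.map (fun pos => pos.1 - 38))
      PySem.Dict.empty 0
      = pvLoopA (ps.map (fun pos => pos.1 - 38))
          (PySem.Dict.empty.insert 0 [p.1 - 38 - 38, q.1 - 38]) 1 := by
    simp [pvLoopA]
  have hk : ∀ k ∈ (PySem.Dict.empty.insert (0 : Int) [p.1 - 38 - 38, q.1 - 38]).keys,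
      k < (1 : Int) := by
    intro k hkm
    rcases (PySem.Dict.mem_keys_insert _ _ _ _).mp hkm with h | h
    · omega
    · simp [PySem.Dict.keys_empty] at h
  have hv : ((PySem.Dict.empty.insert (0 : Int) [p.1 - 38 - 38, q.1 - 38]).getD
      ((1 : Int) - 1) []).getD 1 0 = q.1 - 38 := by
    norm_num [PySem.Dict.getD_insert_self]
  have hA := pvLoopA_full (ps.map (fun pos => pos.1 - 38))
      (PySem.Dict.empty.insert 0 [p.1 - 38 - 38, q.1 - 38]) 1 (q.1 - 38)
      (le_refl 1) hk hv
  have hB := pvZip_chain ((q.1 - 38) :: ps.map (fun pos => pos.1 - 38)) (p.1 - 38 - 38) 0 745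
  simp only [step0]
  rw [hA]
  have : (PySem.Dict.empty.insert (0 : Int) [p.1 - 38 - 38, q.1 - 38]).items
      = [(0, [p.1 - 38 - 38, q.1 - 38])] := by
    rw [PySem.Dict.items_insert_of_not_contains _ _ (by simp [PySem.Dict.contains_empty])]
    simp [PySem.Dict.empty]
  rw [this]
  simp only [List.cons_append, Nat.cast_zero] at hB ⊢
  rw [hB]
  simp [pvChain]
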